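-- pv_equiv track=rewrite | github.com/dkudrow/submit | nudibranch/diff_render.py | change_same_starting_points
-- ===== SOURCE A (Python) =====
-- def change_same_starting_points(flaglist):
--     """Gets points at which changes begin"""
--
--     change_points = []
--     same_points = []
--     in_change = False
--
--     if flaglist and not flaglist[0]:
--         same_points.append(0)
--
--     for x, flag in enumerate(flaglist):
--         if flag and not in_change:
--             change_points.append(x)
--             in_change = True
--         elif not flag and in_change:
--             same_points.append(x)
--             in_change = False
--
--     return (change_points, same_points)
-- ===== SOURCE B (Python) =====
-- def change_same_starting_points(flaglist):
--     """Gets points at which changes begin"""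
--     change_points = []
--     same_points = []
--     i, n = 0, len(flaglist)
--     while i < n:
--         flag = flaglist[i]
--         (change_points if flag else same_points).append(i)
--         j = i + 1
--         while j < n and flaglist[j] == flag:
--             j += 1
--         i = j
--     return (change_points, same_points)
-- ===== Notes on version B (the rewrite author's own statement) =====
-- stated objective: alternative
-- what changed: B walks maximal runs of equal flags with a run-skipping inner scan, recording each run's start index directly, instead of A's per-element state machine with an in_change flag and a special-cased initial same-point.
import Mathlib
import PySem

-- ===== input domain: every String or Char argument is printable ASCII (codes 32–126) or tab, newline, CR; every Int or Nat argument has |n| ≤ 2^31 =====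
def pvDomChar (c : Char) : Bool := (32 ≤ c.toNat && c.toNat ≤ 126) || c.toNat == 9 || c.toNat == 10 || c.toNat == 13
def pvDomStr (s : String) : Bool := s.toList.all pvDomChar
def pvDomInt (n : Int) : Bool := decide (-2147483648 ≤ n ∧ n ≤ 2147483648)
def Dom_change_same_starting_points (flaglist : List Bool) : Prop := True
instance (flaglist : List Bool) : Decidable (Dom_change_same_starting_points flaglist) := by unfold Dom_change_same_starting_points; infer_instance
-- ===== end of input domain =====

-- B walks maximal runs of equal flags (run-skipping scan) instead of A's per-element in_change state machine; same O(n) cost, alternative decomposition.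

-- ===== PORT A =====
-- per-element loop with in_change flag, plus special-cased initial same point
def change_same_starting_points (flaglist : List Bool) : List Int × List Int :=
  let same0 : List Int := match flaglist with
    | false :: _ => [0]          -- `if flaglist and not flaglist[0]: same_points.append(0)`
    | _ => []
  let r := (PySem.List.enumerate flaglist).foldl
    (fun s p =>
      if p.2 && !s.2.2 then (s.1 ++ [p.1], s.2.1, true)
      else if !p.2 && s.2.2 then (s.1, s.2.1 ++ [p.1], false)
      else s)
    (([] : List Int), same0, false)
  (r.1, r.2.1)

-- ===== PORT B =====
-- outer while loop of Source B: record run start i, inner scan (takeWhile/dropWhile) skips the run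
def pvAltGo (i : Int) : List Bool → List Int × List Int
  | [] => ([], [])
  | f :: rest =>
    let run := rest.takeWhile (· == f)
    let tail := rest.dropWhile (· == f)
    let r := pvAltGo (i + 1 + run.length) tail
    if f then (i :: r.1, r.2) else (r.1, i :: r.2)
termination_by xs => xs.length
decreasing_by
  exact Nat.lt_succ_of_le (List.length_dropWhile_le _ _)

def change_same_starting_points_alt (flaglist : List Bool) : List Int × List Int :=
  pvAltGo 0 flaglist

-- ===== PRECONDITION & SPEC =====
def Spec_change_same_starting_points (flaglist : List Bool) (out : List Int × List Int) : Prop := out = change_same_starting_points_alt flaglist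
instance (flaglist : List Bool) (out : List Int × List Int) : Decidable (Spec_change_same_starting_points flaglist out) := by unfold Spec_change_same_starting_points; infer_instance

-- ===== CLAIM (what is proved, stated in full; the proofs are below) =====
def Claim_equal_change_same_starting_points : Prop := ∀ (flaglist : List Bool), Dom_change_same_starting_points flaglist → Spec_change_same_starting_points flaglist (change_same_starting_points flaglist)

-- ===== LEMMAS AND PROOFS =====

-- reference: per-element recursion carrying the previous flag (= in_change after each step)
def pvR (prev : Bool) (i : Int) : List Bool → List Int × List Int
  | [] => ([], [])
  | f :: rest =>
    let r := pvR f (i + 1) rest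
    if f && !prev then (i :: r.1, r.2)
    else if !f && prev then (r.1, i :: r.2) else r

theorem pv_fold_eq_R (xs : List Bool) : ∀ (i : Int) (cp sp : List Int) (inc : Bool),
    ((PySem.List.enumerate xs i).foldl
      (fun s p =>
        if p.2 && !s.2.2 then (s.1 ++ [p.1], s.2.1, true)
        else if !p.2 && s.2.2 then (s.1, s.2.1 ++ [p.1], false)
        else s)
      (cp, sp, inc)).1 = cp ++ (pvR inc i xs).1
  ∧ ((PySem.List.enumerate xs i).foldl
      (fun s p =>
        if p.2 && !s.2.2 then (s.1 ++ [p.1], s.2.1, true)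
        else if !p.2 && s.2.2 then (s.1, s.2.1 ++ [p.1], false)
        else s)
      (cp, sp, inc)).2.1 = sp ++ (pvR inc i xs).2 := by
  induction xs with
  | nil => intro i cp sp inc; simp [PySem.List.enumerate_nil, pvR]
  | cons f rest ih =>
    intro i cp sp inc
    rw [PySem.List.enumerate_cons]
    cases f <;> cases inc
    · exact ⟨((ih (i+1) cp sp false).1).trans (by simp [pvR]),
             ((ih (i+1) cp sp false).2).trans (by simp [pvR])⟩
    · exact ⟨((ih (i+1) cp (sp ++ [i]) false).1).trans (by simp [pvR]),
             ((ih (i+1) cp (sp ++ [i]) false).2).trans (by simp [pvR])⟩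
    · exact ⟨((ih (i+1) (cp ++ [i]) sp true).1).trans (by simp [pvR]),
             ((ih (i+1) (cp ++ [i]) sp true).2).trans (by simp [pvR])⟩
    · exact ⟨((ih (i+1) cp sp true).1).trans (by simp [pvR]),
             ((ih (i+1) cp sp true).2).trans (by simp [pvR])⟩

theorem pv_R_eq_altGo (rest : List Bool) : ∀ (f : Bool) (i : Int),
    pvR f i rest = pvAltGo (i + (rest.takeWhile (· == f)).length) (rest.dropWhile (· == f)) := by
  induction rest with
  | nil => intro f i; simp [pvR, pvAltGo]
  | cons g rest' ih =>
    intro f i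
    by_cases h : g = f
    · subst h
      have : pvR g i (g :: rest') = pvR g (i + 1) rest' := by
        cases g <;> simp [pvR]
      rw [this, ih g (i + 1)]
      simp
      ring_nf
    · have hg : (g == f) = false := by simp [h]
      have hdw : (g :: rest').dropWhile (· == f) = g :: rest' := by
        simp [hg]
      have htw : ((g :: rest').takeWhile (· == f)).length = 0 := by
        simp [hg]
      rw [hdw, htw]
      have hrec : pvR g (i + 1) rest' =
          pvAltGo (i + 1 + (rest'.takeWhile (· == g)).length) (rest'.dropWhile (· == g)) :=
        ih g (i + 1)
      cases g <;> cases f <;> simp_all [pvR, pvAltGo]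

theorem pv_A_eq_B (xs : List Bool) :
    change_same_starting_points xs = change_same_starting_points_alt xs := by
  cases xs with
  | nil =>
    simp [change_same_starting_points, change_same_starting_points_alt,
      PySem.List.enumerate_nil, pvAltGo]
  | cons f rest =>
    cases f
    · have h1 := pv_fold_eq_R (false :: rest) 0 ([] : List Int) ([0] : List Int) false
      have hL := pv_R_eq_altGo rest false 1
      simp only [change_same_starting_points, change_same_starting_points_alt]
      exact Prod.ext (h1.1.trans (by simp [pvR, pvAltGo, hL]))
                     (h1.2.trans (by simp [pvR, pvAltGo, hL]))
    · have h1 := pv_fold_eq_R (true :: rest) 0 ([] : List Int) ([] : List Int) false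
      have hL := pv_R_eq_altGo rest true 1
      simp only [change_same_starting_points, change_same_starting_points_alt]
      exact Prod.ext (h1.1.trans (by simp [pvR, pvAltGo, hL]))
                     (h1.2.trans (by simp [pvR, pvAltGo, hL]))

-- ===== VERDICT (by name: the statement is the Claim_ definition above) =====
theorem change_same_starting_points_spec : Claim_equal_change_same_starting_points := by
  intro flaglist _
  unfold Spec_change_same_starting_points
  exact pv_A_eq_B flaglist
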